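-- pv_equiv track=rewrite | github.com/23adrian2300/WDI-AGH | Zestaw 6/Zestaw 6.py | tnij
-- ===== SOURCE A (Python) =====
-- def is_first(n):
--     if n == 2 or n == 3:
--         return True
--     if n % 2 == 0 or n % 3 == 0:
--         return False
--     if n <= 1:
--         return False
--     i = 5
--     while i * i < n:
--         if n % i == 0:
--             return False
--         i += 2
--         if n % i == 0:
--             return False
--         i += 4
--     return True
--
-- def tnij(t, od=0):
--     n = len(t)
--     i = od + 2
--     while i <= n and i <= 30:
--         liczba = 0
--         for a in range(od, i):
--             liczba = liczba * 2 + t[a]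
--         if is_first(liczba):
--             if (od != 0 and i == n) or tnij(t, i):
--                 return True
--         i += 1
--     return False
-- ===== SOURCE B (Python) =====
-- def is_first(n):
--     if n == 2 or n == 3:
--         return True
--     if n % 2 == 0 or n % 3 == 0:
--         return False
--     if n <= 1:
--         return False
--     i = 5
--     while i * i < n:
--         if n % i == 0:
--             return False
--         i += 2
--         if n % i == 0:
--             return False
--         i += 4
--     return True
--
-- def tnij(t, od=0):
--     # bottom-up DP over starting positions instead of recursion over split points
--     n = len(t)
--     hi = n if n < 30 else 30
--     if od + 2 > hi:
--         return False
--     dp = {}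
--     for j in range(hi, od - 1, -1):
--         val = 0
--         res = False
--         for i in range(j + 1, hi + 1):
--             val = val * 2 + t[i - 1]
--             if i < j + 2:
--                 continue
--             if is_first(val) and ((j != 0 and i == n) or dp[i]):
--                 res = True
--                 break
--         dp[j] = res
--     return dp[od]
-- ===== Notes on version B (the rewrite author's own statement) =====
-- stated objective: alternative
-- what changed: Replaced A's top-down recursion over split points by a bottom-up dynamic programme over starting positions (a dict dp[j] filled from the right), with the segment value built incrementally instead of recomputed by an inner range-fold for every end point; it trades A's exponential worst-case branching (only reachable at lengths near 30) for a quadratic table fill.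
import Mathlib
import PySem

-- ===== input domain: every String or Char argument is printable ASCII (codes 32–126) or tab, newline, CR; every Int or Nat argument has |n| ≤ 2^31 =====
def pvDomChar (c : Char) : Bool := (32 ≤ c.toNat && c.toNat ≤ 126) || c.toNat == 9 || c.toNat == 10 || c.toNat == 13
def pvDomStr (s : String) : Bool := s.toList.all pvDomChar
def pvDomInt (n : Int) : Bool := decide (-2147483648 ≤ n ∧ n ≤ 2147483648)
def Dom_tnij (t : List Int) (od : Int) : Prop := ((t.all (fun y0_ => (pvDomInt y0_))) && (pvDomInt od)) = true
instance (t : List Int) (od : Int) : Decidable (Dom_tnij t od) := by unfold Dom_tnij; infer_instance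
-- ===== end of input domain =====

-- B replaces A's recursion over split points by a bottom-up DP table over starting
-- positions; proved to return the same Bool on all inputs where the Python A returns
-- (Pre_ excludes only the IndexError inputs).


-- ===== PORT A =====
-- is_first's trial loop: while i*i < n: check n%i, i+=2, check n%i, i+=4
def isFirstLoop (n i : Int) : Bool :=
  if h : i * i < n then
    if PySem.Int.mod n i = 0 then false
    else if PySem.Int.mod n (i + 2) = 0 then false
    else isFirstLoop n (i + 6)
  else true
termination_by (n - i).toNat
decreasing_by
  have hi2 : i ≤ i * i := by by_cases h0 : i ≤ 0 <;> nlinarith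
  omega

def isFirst (n : Int) : Bool :=
  if n = 2 ∨ n = 3 then true
  else if PySem.Int.mod n 2 = 0 ∨ PySem.Int.mod n 3 = 0 then false
  else if n ≤ 1 then false
  else isFirstLoop n 5

-- t[a] is ported as (pyGet? t a).getD 0: exact whenever the index is in range (Pre_tnij
-- excludes exactly the inputs on which Python's t[a] raises IndexError).
-- seg t od i = A's inner for-loop: the value of t[od:i] read as a binary number
def seg (t : List Int) (od i : Int) : Int :=
  (PySem.List.pyRange od i 1).foldl (fun acc a => acc * 2 + (PySem.List.pyGet? t a).getD 0) 0

-- The while-loop of tnij carries the invariant od + 2 ≤ i as a Prop argument (termination only).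
mutual
def tnijA (t : List Int) (od : Int) : Bool :=
  tnijALoop t od (od + 2) (by omega)
termination_by ((min (t.length : Int) 30 + 2 - od).toNat, 1, 0)

def tnijALoop (t : List Int) (od i : Int) (h : od + 2 ≤ i) : Bool :=
  if hc : i ≤ (t.length : Int) ∧ i ≤ 30 then
    let liczba := seg t od i
    if isFirst liczba then
      if (decide (od ≠ 0) && decide (i = (t.length : Int))) || tnijA t i then true
      else tnijALoop t od (i + 1) (by omega)
    else tnijALoop t od (i + 1) (by omega)
  else false
termination_by ((min (t.length : Int) 30 + 2 - od).toNat, 0, (31 - i).toNat)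
decreasing_by
  · refine Prod.Lex.left _ _ ?_; omega
  · refine Prod.Lex.right _ ?_; refine Prod.Lex.right _ ?_; omega
  · refine Prod.Lex.right _ ?_; refine Prod.Lex.right _ ?_; omega
end

def tnij (t : List Int) (od : Int) : Bool := tnijA t od

-- ===== PORT B =====
-- inner for-loop body of Source B (state = (val, res); res true means 'break' already taken)
def tnijBStep (t : List Int) (n j : Int) (dp : PySem.Dict Int Bool)
    (st : Int × Bool) (i : Int) : Int × Bool :=
  if st.2 then st
  else
    let val := st.1 * 2 + (PySem.List.pyGet? t (i - 1)).getD 0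
    if i < j + 2 then (val, false)
    else if isFirst val && ((decide (j ≠ 0) && decide (i = n)) || PySem.Dict.getD dp i false) then
      (val, true)
    else (val, false)

-- dp[i] in Source B never misses (i is always a previously filled key); getD … false is exact there
def tnij_alt (t : List Int) (od : Int) : Bool :=
  let n : Int := t.length
  let hi : Int := if n < 30 then n else 30
  if od + 2 > hi then false
  else
    let dp := (PySem.List.pyRange hi (od - 1) (-1)).foldl
      (fun dp j =>
        dp.insert j ((PySem.List.pyRange (j + 1) (hi + 1) 1).foldl (tnijBStep t n j dp) (0, false)).2)
      PySem.Dict.empty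
    PySem.Dict.getD dp od false

-- ===== PRECONDITION & SPEC =====
-- Pre_ excludes exactly the inputs on which Python A raises IndexError: the loop body runs
-- (od + 2 ≤ min(len t, 30)) while od is below -len t, so t[od] is out of range.
def Pre_tnij (t : List Int) (od : Int) : Prop :=
  -(t.length : Int) ≤ od ∨ min (t.length : Int) 30 < od + 2
instance (t : List Int) (od : Int) : Decidable (Pre_tnij t od) := by unfold Pre_tnij; infer_instance

def pvWitness_tnij : List Int × Int := ([1, 0, 1, 1], 0)

def Spec_tnij (t : List Int) (od : Int) (out : Bool) : Prop := out = tnij_alt t od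
instance (t : List Int) (od : Int) (out : Bool) : Decidable (Spec_tnij t od out) := by unfold Spec_tnij; infer_instance

-- ===== CLAIM (what is proved, stated in full; the proofs are below) =====
def Claim_equal_tnij : Prop := ∀ (t : List Int) (od : Int), Dom_tnij t od → Pre_tnij t od → Spec_tnij t od (tnij t od)

-- ===== LEMMAS AND PROOFS =====

theorem seg_succ (t : List Int) (j i : Int) (h : j ≤ i) :
    seg t j (i + 1) = seg t j i * 2 + (PySem.List.pyGet? t i).getD 0 := by
  unfold seg
  rw [PySem.List.pyRange_one_succ_right h, List.foldl_append]
  rfl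

theorem seg_self (t : List Int) (j : Int) : seg t j j = 0 := by
  unfold seg
  rw [PySem.List.pyRange_one_eq_nil (by omega)]
  rfl

-- once res = true (the Python break), the remaining fold is inert
theorem step_stuck (t : List Int) (n j : Int) (dp : PySem.Dict Int Bool)
    (l : List Int) (v : Int) :
    (l.foldl (tnijBStep t n j dp) (v, true)).2 = true := by
  induction l generalizing v with
  | nil => rfl
  | cons x xs ih => simpa [tnijBStep] using ih v

-- one inner step in the 'continue' region i < j + 2
theorem tnijBStep_skip (t : List Int) (n j : Int) (dp : PySem.Dict Int Bool)
    (v i : Int) (hlt : i < j + 2) :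
    tnijBStep t n j dp (v, false) i = (v * 2 + (PySem.List.pyGet? t (i - 1)).getD 0, false) := by
  unfold tnijBStep
  dsimp only
  rw [if_neg Bool.false_ne_true, if_pos hlt]

-- one inner step in the testing region i ≥ j + 2
theorem tnijBStep_test (t : List Int) (n j : Int) (dp : PySem.Dict Int Bool)
    (v i : Int) (hge : ¬ i < j + 2) :
    tnijBStep t n j dp (v, false) i =
      (v * 2 + (PySem.List.pyGet? t (i - 1)).getD 0,
        isFirst (v * 2 + (PySem.List.pyGet? t (i - 1)).getD 0) &&
          ((decide (j ≠ 0) && decide (i = n)) || dp.getD i false)) := by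
  unfold tnijBStep
  dsimp only
  rw [if_neg Bool.false_ne_true, if_neg hge]
  by_cases hc : (isFirst (v * 2 + (PySem.List.pyGet? t (i - 1)).getD 0) &&
      ((decide (j ≠ 0) && decide (i = n)) || dp.getD i false)) = true
  · rw [if_pos hc, hc]
  · rw [if_neg hc]
    rw [Bool.not_eq_true] at hc
    rw [hc]

-- inner bridge: from end point i onwards, B's fold computes A's loop at i
theorem inner_bridge (t : List Int) (j : Int) (dp : PySem.Dict Int Bool)
    (Hdp : ∀ k, j < k → k ≤ min (t.length : Int) 30 → dp.getD k false = tnijA t k)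
    (m : Nat) :
    ∀ (i : Int) (h2 : j + 2 ≤ i), i ≤ min (t.length : Int) 30 + 1 →
      (min (t.length : Int) 30 + 1 - i).toNat = m →
      ((PySem.List.pyRange i (min (t.length : Int) 30 + 1) 1).foldl
          (tnijBStep t (t.length : Int) j dp) (seg t j (i - 1), false)).2
        = tnijALoop t j i h2 := by
  induction m with
  | zero =>
    intro i h2 hle hm
    have hng : ¬ (i ≤ (t.length : Int) ∧ i ≤ 30) := by omega
    rw [PySem.List.pyRange_one_eq_nil (by omega), tnijALoop, dif_neg hng]
    rfl
  | succ m ih =>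
    intro i h2 hle hm
    have hi : i ≤ min (t.length : Int) 30 := by omega
    rw [PySem.List.pyRange_one_cons (by omega)]
    simp only [List.foldl_cons]
    rw [tnijBStep_test t _ j dp _ i (by omega)]
    have hseg : seg t j (i - 1) * 2 + (PySem.List.pyGet? t (i - 1)).getD 0 = seg t j i := by
      have h := seg_succ t j (i - 1) (by omega)
      rw [show i - 1 + 1 = i by ring] at h
      exact h.symm
    rw [hseg]
    have hc : i ≤ (t.length : Int) ∧ i ≤ 30 := by omega
    rw [tnijALoop, dif_pos hc, Hdp i (by omega) hi]
    by_cases hf : isFirst (seg t j i) = true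
    · rw [if_pos hf, hf, Bool.true_and]
      by_cases hor : ((decide (j ≠ 0) && decide (i = (t.length : Int))) || tnijA t i) = true
      · rw [if_pos hor, hor]
        exact step_stuck t _ j dp _ _
      · rw [if_neg hor]
        rw [Bool.not_eq_true] at hor
        rw [hor]
        have ih' := ih (i + 1) (by omega) (by omega) (by omega)
        rw [show i + 1 - 1 = i by ring] at ih'
        exact ih'
    · rw [if_neg hf]
      rw [Bool.not_eq_true] at hf
      rw [hf, Bool.false_and]
      have ih' := ih (i + 1) (by omega) (by omega) (by omega)
      rw [show i + 1 - 1 = i by ring] at ih'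
      exact ih'

-- B's full inner loop for start j equals A's recursive call at j
theorem inner_full (t : List Int) (j : Int) (dp : PySem.Dict Int Bool)
    (hj : j ≤ min (t.length : Int) 30)
    (Hdp : ∀ k, j < k → k ≤ min (t.length : Int) 30 → dp.getD k false = tnijA t k) :
    ((PySem.List.pyRange (j + 1) (min (t.length : Int) 30 + 1) 1).foldl
        (tnijBStep t (t.length : Int) j dp) (0, false)).2 = tnijA t j := by
  rw [tnijA]
  by_cases hlast : j = min (t.length : Int) 30
  · rw [PySem.List.pyRange_one_eq_nil (by omega), tnijALoop]
    have hng : ¬ (j + 2 ≤ (t.length : Int) ∧ j + 2 ≤ 30) := by omega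
    rw [dif_neg hng]
    rfl
  · rw [PySem.List.pyRange_one_cons (by omega)]
    simp only [List.foldl_cons]
    rw [tnijBStep_skip t _ j dp 0 (j + 1) (by omega)]
    have h01 : (0 : Int) * 2 + (PySem.List.pyGet? t (j + 1 - 1)).getD 0 = seg t j (j + 2 - 1) := by
      rw [show j + 2 - 1 = j + 1 by ring, seg_succ t j j (le_refl j), seg_self,
        show j + 1 - 1 = j by ring]
    rw [h01, show (j + 1 : Int) + 1 = j + 2 by ring]
    exact inner_bridge t j dp Hdp (min (t.length : Int) 30 + 1 - (j + 2)).toNat (j + 2)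
      (by omega) (by omega) rfl

-- outer DP fold invariant: after the countdown from j, every key in [b, hi] holds tnijA
theorem outer_fold (t : List Int) (b : Int) (m : Nat) :
    ∀ (j : Int) (dp : PySem.Dict Int Bool),
      (j - (b - 1)).toNat = m → j ≤ min (t.length : Int) 30 →
      (∀ k, j < k → k ≤ min (t.length : Int) 30 → dp.getD k false = tnijA t k) →
      ∀ k, b ≤ k → k ≤ min (t.length : Int) 30 →
        ((PySem.List.pyRange j (b - 1) (-1)).foldl
            (fun dp j =>
              dp.insert j ((PySem.List.pyRange (j + 1) (min (t.length : Int) 30 + 1) 1).foldl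
                (tnijBStep t (t.length : Int) j dp) (0, false)).2)
            dp).getD k false = tnijA t k := by
  induction m with
  | zero =>
    intro j dp hm hj Hdp k hbk hkhi
    rw [PySem.List.pyRange_neg_one_eq_nil (by omega)]
    exact Hdp k (by omega) hkhi
  | succ m ih =>
    intro j dp hm hj Hdp k hbk hkhi
    rw [PySem.List.pyRange_neg_one_cons (by omega)]
    simp only [List.foldl_cons]
    apply ih (j - 1) _ (by omega) (by omega) _ k hbk hkhi
    intro k' hk' hk'hi
    rw [PySem.Dict.getD_insert]
    by_cases hkj' : k' = j
    · rw [if_pos hkj', hkj']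
      exact inner_full t j dp hj Hdp
    · rw [if_neg hkj']
      exact Hdp k' (by omega) hk'hi

theorem tnij_eq_alt (t : List Int) (od : Int) : tnij t od = tnij_alt t od := by
  unfold tnij tnij_alt
  simp only []
  have hhi : (if (t.length : Int) < 30 then (t.length : Int) else 30) = min (t.length : Int) 30 := by
    split <;> omega
  rw [hhi]
  by_cases hg : od + 2 > min (t.length : Int) 30
  · rw [if_pos hg, tnijA, tnijALoop]
    have : ¬ (od + 2 ≤ (t.length : Int) ∧ od + 2 ≤ 30) := by omega
    simp [this]
  · rw [if_neg hg]
    rw [outer_fold t od (min (t.length : Int) 30 - (od - 1)).toNat (min (t.length : Int) 30)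
        PySem.Dict.empty rfl (by omega) (by intro k h1 h2; omega) od (le_refl od) (by omega)]

-- ===== VERDICT (by name: the statement is the Claim_ definition above) =====
theorem tnij_spec : Claim_equal_tnij := by
  intro t od _ _
  unfold Spec_tnij
  exact tnij_eq_alt t od
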